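-- pv_equiv track=rewrite | github.com/E-STAT/AngelHack_May_Challenge | 10-05-2023.py | min_efficiency
-- ===== SOURCE A (Python) =====
-- def min_efficiency(efficiency):
--     """
--     Given a list of integers `efficiency`, returns a list containing the cost
--     of each configuration where the list is partitioned into pairs, and the
--     cost is the sum of the absolute differences between each pair.
--
--     Args:
--     - efficiency (list of int): the list of integers to partition into pairs
--
--     Returns:
--     - list of int: the cost of each partition configuration
--     """
--     n = len(efficiency)
--     efficiency.sort()
--     costs = []
--     for i in range(n):
--         pairs = efficiency[:i] + efficiency[i+1:]
--         cost = sum(abs(pairs[j] - pairs[j+1]) for j in range(0, n-2, 2))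
--         costs.append(cost)
--     return(costs)
-- ===== SOURCE B (Python) =====
-- def min_efficiency(efficiency):
--     """Faster re-implementation: sort once, precompute suffix pairing costs and
--     a running prefix pairing cost, answer each leave-one-out index in O(1).
--     (Like the original, it sorts the input list in place.)"""
--     efficiency.sort()
--     s = efficiency
--     n = len(s)
--     # Srev holds suffix pairing costs back to front: after the loop,
--     # Srev[t] = cost of pairing s[n-t...] consecutively (0 for t in {0,1}).
--     Srev = [0, 0]
--     for k in range(n - 2, -1, -1):
--         Srev.append(abs(s[k + 1] - s[k]) + Srev[-2])
--     S = Srev[::-1]  # S[k] = cost of pairing s[k:] consecutively, 0 <= k <= n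
--     costs = []
--     pe = 0  # cost of pairing s[:i - i % 2] consecutively
--     for i in range(n):
--         if i % 2 == 0:
--             costs.append(pe + S[i + 1])
--         else:
--             c = pe
--             if i + 1 < n:
--                 c += abs(s[i + 1] - s[i - 1]) + S[i + 2]
--             costs.append(c)
--             pe += abs(s[i] - s[i - 1])
--     return costs
-- ===== Notes on version B (the rewrite author's own statement) =====
-- stated objective: faster
-- what changed: Instead of rebuilding the leave-one-out list and rescanning all adjacent pairs for every index, B sorts once, precomputes suffix pairing costs in one backward pass and maintains a running prefix pairing cost, answering each index in O(1).
import Mathlib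
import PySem

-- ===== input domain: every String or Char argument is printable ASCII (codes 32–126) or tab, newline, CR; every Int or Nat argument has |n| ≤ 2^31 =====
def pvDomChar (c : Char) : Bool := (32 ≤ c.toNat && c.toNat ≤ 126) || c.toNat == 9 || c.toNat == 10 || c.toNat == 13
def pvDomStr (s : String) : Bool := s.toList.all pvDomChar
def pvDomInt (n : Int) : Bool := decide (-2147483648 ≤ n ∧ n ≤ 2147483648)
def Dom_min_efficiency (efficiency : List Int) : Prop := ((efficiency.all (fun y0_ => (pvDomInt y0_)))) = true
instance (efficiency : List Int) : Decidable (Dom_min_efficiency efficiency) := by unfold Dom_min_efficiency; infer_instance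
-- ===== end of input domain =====

-- B replaces A's per-index O(n) rescan with one suffix-cost pass plus a running prefix cost
-- (objective: faster, O(n^2) → O(n log n)); like A, the Python B sorts its argument in place —
-- the equivalence proved here is about the return value.

-- ===== PORT A =====
def min_efficiency (efficiency : List Int) : List Int :=
  let n : Int := efficiency.length
  let s := PySem.List.sorted efficiency (fun x => x) false
  (PySem.List.pyRange 0 n 1).foldl (fun costs i =>
    let pairs := PySem.List.slice s none (some i) ++ PySem.List.slice s (some (i+1)) none
    let cost := ((PySem.List.pyRange 0 (n-2) 2).map (fun j =>
        |PySem.List.pyGetD pairs j 0 - PySem.List.pyGetD pairs (j+1) 0|)).sum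
    costs ++ [cost]) []

-- ===== PORT B =====
def min_efficiency_alt (efficiency : List Int) : List Int :=
  let s := PySem.List.sorted efficiency (fun x => x) false
  let n : Int := s.length
  -- Srev[t] = cost of pairing s[n-t:] consecutively, built back to front
  let Srev := (PySem.List.pyRange (n-2) (-1) (-1)).foldl (fun Srev k =>
      Srev ++ [|PySem.List.pyGetD s (k+1) 0 - PySem.List.pyGetD s k 0| +
               PySem.List.pyGetD Srev (-2) 0]) [0, 0]
  let S := Srev.reverse  -- Srev[::-1]  (PySem.List.slice?_none_none_neg_one)
  ((PySem.List.pyRange 0 n 1).foldl (fun (st : List Int × Int) i =>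
      let costs := st.1
      let pe := st.2
      if PySem.Int.mod i 2 = 0 then
        (costs ++ [pe + PySem.List.pyGetD S (i+1) 0], pe)
      else
        let c := pe + (if i + 1 < n then
            |PySem.List.pyGetD s (i+1) 0 - PySem.List.pyGetD s (i-1) 0| +
            PySem.List.pyGetD S (i+2) 0 else 0)
        (costs ++ [c], pe + |PySem.List.pyGetD s i 0 - PySem.List.pyGetD s (i-1) 0|))
    ([], 0)).1

-- ===== PRECONDITION & SPEC =====
def Spec_min_efficiency (efficiency : List Int) (out : List Int) : Prop := out = min_efficiency_alt efficiency
instance (efficiency : List Int) (out : List Int) : Decidable (Spec_min_efficiency efficiency out) := by unfold Spec_min_efficiency; infer_instance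

-- ===== CLAIM (what is proved, stated in full; the proofs are below) =====
def Claim_equal_min_efficiency : Prop := ∀ (efficiency : List Int), Dom_min_efficiency efficiency → Spec_min_efficiency efficiency (min_efficiency efficiency)

-- ===== LEMMAS AND PROOFS =====

-- cost of pairing a list consecutively: |x0-x1| + |x2-x3| + ...
def pairSum : List Int → Int
  | a :: b :: t => |a - b| + pairSum t
  | _ => 0

theorem pairSum_append_even (u v : List Int) (h : u.length % 2 = 0) :
    pairSum (u ++ v) = pairSum u + pairSum v := by
  induction u using pairSum.induct with
  | case1 a b t ih => simp [pairSum, ih (by simp [List.length_cons] at h; omega)]; ring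
  | case2 u hu =>
    match u, hu with
    | [], _ => simp [pairSum]
    | [a], h2 => simp at h
    | a :: b :: t, h2 => exact absurd rfl (h2 a b t)

theorem natSum_eq_pairSum (p : List Int) :
    ((List.range (p.length / 2)).map (fun k =>
        |p.getD (2*k) 0 - p.getD (2*k+1) 0|)).sum = pairSum p := by
  induction p using pairSum.induct with
  | case1 a b t ih =>
    have hlen : (a :: b :: t).length / 2 = t.length / 2 + 1 := by
      simp [List.length_cons]; omega
    rw [hlen, List.range_succ_eq_map]
    simp only [List.map_cons, List.map_map, List.sum_cons]
    have : ((List.range (t.length / 2)).map ((fun k =>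
        |(a :: b :: t).getD (2*k) 0 - (a :: b :: t).getD (2*k+1) 0|) ∘ (· + 1))).sum
        = ((List.range (t.length / 2)).map (fun k =>
        |t.getD (2*k) 0 - t.getD (2*k+1) 0|)).sum := by
      refine congrArg List.sum (List.map_congr_left (fun k _ => ?_))
      have h1 : 2*(k+1) = 2*k+1+1 := by omega
      have h2 : 2*(k+1)+1 = 2*k+1+1+1 := by omega
      simp [Function.comp, h1]
    rw [this, ih]
    simp [pairSum]
  | case2 u hu =>
    match u, hu with
    | [], _ => simp [pairSum]
    | [a], _ => simp [pairSum]
    | a :: b :: t, h2 => exact absurd rfl (h2 a b t)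

theorem rangeSum_eq_pairSum (p : List Int) :
    ((PySem.List.pyRange 0 ((p.length : Int) - 1) 2).map (fun j =>
        |PySem.List.pyGetD p j 0 - PySem.List.pyGetD p (j+1) 0|)).sum = pairSum p := by
  rw [PySem.List.pyRange_of_pos _ _ (by norm_num)]
  have hcnt : (if (0:Int) < (p.length : Int) - 1 then
      (((p.length : Int) - 1 - 0 + 2 - 1) / 2).toNat else 0) = p.length / 2 := by
    split_ifs with h <;> omega
  rw [hcnt, List.map_map, ← natSum_eq_pairSum p]
  refine congrArg List.sum (List.map_congr_left (fun k _ => ?_))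
  have e1 : (2:Int) * (k:Int) = ((2*k : Nat) : Int) := by push_cast; ring
  simp only [Function.comp_apply, zero_add]
  rw [e1, show ((2*k:Nat):Int) + 1 = ((2*k+1 : Nat) : Int) by push_cast; ring,
     PySem.List.pyGetD_natCast, PySem.List.pyGetD_natCast]

theorem pairSum_small (l : List Int) (h : l.length ≤ 1) : pairSum l = 0 := by
  match l with
  | [] => rfl
  | [a] => rfl
  | a :: b :: t => simp at h

theorem pairSum_drop (s : List Int) (k : Nat) (h : k + 1 < s.length) :
    pairSum (s.drop k) = |s.getD k 0 - s.getD (k+1) 0| + pairSum (s.drop (k+2)) := by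
  rw [List.drop_eq_getElem_cons (by omega), List.drop_eq_getElem_cons (by omega)]
  rw [List.getD_eq_getElem s 0 (by omega), List.getD_eq_getElem s 0 (by omega)]
  simp [pairSum]

-- Srev loop invariant

theorem loopS (s : List Int) :
    ∀ (k : Nat), k ≤ s.length - 1 → 1 ≤ s.length →
    (PySem.List.pyRange ((k:Int)-1) (-1) (-1)).foldl
      (fun Srev k => Srev ++ [|PySem.List.pyGetD s (k+1) 0 - PySem.List.pyGetD s k 0| +
               PySem.List.pyGetD Srev (-2) 0])
      ((List.range (s.length+1-k)).map (fun u => pairSum (s.drop (s.length - u)))) =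
    (List.range (s.length+1)).map (fun u => pairSum (s.drop (s.length - u))) := by
  intro k
  induction k with
  | zero =>
    intro _ _
    rw [show ((0:Nat):Int) - 1 = -1 by norm_num, PySem.List.pyRange_neg_one_eq_nil le_rfl]
    simp
  | succ k ih =>
    intro hk hN
    rw [show ((k+1:Nat):Int) - 1 = (k:Int) by push_cast; ring,
        PySem.List.pyRange_neg_one_cons (by omega), List.foldl_cons]
    have hstep : ((List.range (s.length+1-(k+1))).map (fun u => pairSum (s.drop (s.length - u)))) ++
        [|PySem.List.pyGetD s ((k:Int)+1) 0 - PySem.List.pyGetD s (k:Int) 0| +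
         PySem.List.pyGetD ((List.range (s.length+1-(k+1))).map (fun u => pairSum (s.drop (s.length - u)))) (-2) 0]
        = (List.range (s.length+1-k)).map (fun u => pairSum (s.drop (s.length - u))) := by
      have hk2 : k + 2 ≤ s.length := by omega
      rw [show s.length+1-(k+1) = s.length - k by omega]
      have hlenst : ((List.range (s.length-k)).map (fun u => pairSum (s.drop (s.length - u)))).length = s.length - k := by
        simp
      rw [PySem.List.pyGetD_neg_ofNat _ 2 0 (by norm_num) (by rw [hlenst]; omega)]
      rw [show s.length+1-k = (s.length-k) + 1 by omega, List.range_succ, List.map_append]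
      have e1 : (k:Int) + 1 = ((k+1 : Nat) : Int) := by push_cast; ring
      rw [e1, PySem.List.pyGetD_natCast, PySem.List.pyGetD_natCast]
      congr 1
      simp only [List.length_map, List.length_range]
      simp only [List.map_cons, List.map_nil, List.getElem_map, List.getElem_range]
      rw [show s.length - (s.length - k - 2) = k + 2 by omega,
          show s.length - (s.length - k) = k by omega,
          pairSum_drop s k (by omega), abs_sub_comm]
    rw [hstep]
    exact ih (by omega) hN

theorem Srev_eq (s : List Int) (hN : 1 ≤ s.length) :
    (PySem.List.pyRange ((s.length:Int)-2) (-1) (-1)).foldl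
      (fun Srev k => Srev ++ [|PySem.List.pyGetD s (k+1) 0 - PySem.List.pyGetD s k 0| +
               PySem.List.pyGetD Srev (-2) 0]) [0, 0] =
    (List.range (s.length+1)).map (fun u => pairSum (s.drop (s.length - u))) := by
  have h0 : ((s.length:Int)) - 2 = ((s.length - 1 : Nat) : Int) - 1 := by omega
  have hinit : (List.range (s.length+1-(s.length-1))).map (fun u => pairSum (s.drop (s.length - u))) = [0, 0] := by
    rw [show s.length+1-(s.length-1) = 2 by omega]
    rw [show List.range 2 = [0, 1] from rfl]
    simp only [List.map_cons, List.map_nil]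
    rw [pairSum_small _ (by simp), pairSum_small _ (by simp; omega)]
  rw [h0, ← hinit]
  exact loopS s (s.length - 1) (by omega) hN

theorem S_eq (s : List Int) :
    ((List.range (s.length+1)).map (fun u => pairSum (s.drop (s.length - u)))).reverse =
    (List.range (s.length+1)).map (fun j => pairSum (s.drop j)) := by
  apply List.ext_getElem
  · simp
  · intro j h1 h2
    simp only [List.length_reverse, List.length_map, List.length_range] at h1 h2
    rw [List.getElem_reverse]
    simp only [List.length_map, List.length_range, List.getElem_map, List.getElem_range]
    rw [show s.length - (s.length + 1 - 1 - j) = j by omega]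

theorem S_getD (s : List Int) (j : Nat) (hj : j ≤ s.length) :
    ((List.range (s.length+1)).map (fun j => pairSum (s.drop j))).getD j 0 = pairSum (s.drop j) := by
  rw [List.getD_eq_getElem _ _ (by simp; omega)]
  simp

theorem take_succ_getD (s : List Int) (k : Nat) (h : k < s.length) :
    s.take (k+1) = s.take k ++ [s.getD k 0] := by
  rw [List.take_add_one, List.getElem?_eq_getElem h, List.getD_eq_getElem s 0 h]
  rfl

theorem loopMain (s : List Int) : ∀ (m : Nat), m ≤ s.length →
    (List.range m).foldl (fun (st : List Int × Int) (k : Nat) =>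
      if PySem.Int.mod (k:Int) 2 = 0 then
        (st.1 ++ [st.2 + PySem.List.pyGetD ((List.range (s.length+1)).map (fun j => pairSum (s.drop j))) ((k:Int)+1) 0], st.2)
      else
        (st.1 ++ [st.2 + (if (k:Int) + 1 < (s.length:Int) then
            |PySem.List.pyGetD s ((k:Int)+1) 0 - PySem.List.pyGetD s ((k:Int)-1) 0| +
            PySem.List.pyGetD ((List.range (s.length+1)).map (fun j => pairSum (s.drop j))) ((k:Int)+2) 0 else 0)],
         st.2 + |PySem.List.pyGetD s (k:Int) 0 - PySem.List.pyGetD s ((k:Int)-1) 0|))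
      ([], 0)
    = ((List.range m).map (fun i => pairSum (s.take i ++ s.drop (i+1))),
       pairSum (s.take (m - m % 2))) := by
  intro m
  induction m with
  | zero => simp [pairSum]
  | succ m ih =>
    intro hm
    rw [show List.range (m+1) = List.range m ++ [m] from List.range_succ,
        List.foldl_append, ih (by omega), List.foldl_cons, List.foldl_nil, List.map_append]
    have hmod : PySem.Int.mod (m:Int) 2 = ((m % 2 : Nat) : Int) := by
      exact_mod_cast PySem.Int.mod_natCast m 2
    have e1 : (m:Int) + 1 = ((m+1 : Nat) : Int) := by push_cast; ring
    by_cases hpar : m % 2 = 0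
    · rw [if_pos (by rw [hmod, hpar]; norm_num)]
      rw [show m - m % 2 = m by omega]
      rw [e1, PySem.List.pyGetD_natCast, S_getD s (m+1) (by omega),
          show (m+1) - (m+1) % 2 = m by omega]
      refine Prod.ext ?_ rfl
      simp only [List.map_cons, List.map_nil]
      congr 1
      rw [pairSum_append_even _ _ (by simp [List.length_take]; omega)]
    · have hpar1 : m % 2 = 1 := by omega
      have hm1 : 1 ≤ m := by omega
      rw [if_neg (by rw [hmod, hpar1]; norm_num)]
      have em1 : (m:Int) - 1 = ((m-1 : Nat) : Int) := by omega
      have e2 : (m:Int) + 2 = ((m+2 : Nat) : Int) := by push_cast; ring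
      rw [e1, em1, e2, PySem.List.pyGetD_natCast, PySem.List.pyGetD_natCast, PySem.List.pyGetD_natCast,
          PySem.List.pyGetD_natCast]
      rw [show (m+1) - (m+1) % 2 = m + 1 by omega, show m - m % 2 = m - 1 by omega]
      have htake : s.take m = s.take (m-1) ++ [s.getD (m-1) 0] := by
        rw [← take_succ_getD s (m-1) (by omega), show m - 1 + 1 = m by omega]
      have htake1 : s.take (m+1) = s.take (m-1) ++ [s.getD (m-1) 0, s.getD m 0] := by
        rw [take_succ_getD s m (by omega), htake]; simp
      refine Prod.ext ?_ ?_
      · -- costs component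
        simp only [List.map_cons, List.map_nil]
        congr 1
        rw [htake, List.append_assoc, pairSum_append_even _ _ (by simp [List.length_take]; omega)]
        by_cases hlt : m + 1 < s.length
        · rw [if_pos (by exact_mod_cast hlt)]
          rw [S_getD s (m+2) (by omega)]
          rw [List.drop_eq_getElem_cons (by omega : m + 1 < s.length)]
          rw [show s[m+1] = s.getD (m+1) 0 from (List.getD_eq_getElem s 0 _).symm]
          simp only [List.singleton_append, pairSum]
          rw [abs_sub_comm]
        · rw [if_neg (by exact_mod_cast hlt)]
          have hdrop : s.drop (m+1) = [] := List.drop_eq_nil_of_le (by omega)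
          rw [hdrop]
          simp [pairSum]
      · -- pe component
        simp only []
        rw [htake1, pairSum_append_even _ _ (by simp [List.length_take]; omega)]
        simp [pairSum, abs_sub_comm]

theorem altBody_eq (s : List Int) :
    ((PySem.List.pyRange 0 ((s.length : Int)) 1).foldl (fun (st : List Int × Int) i =>
      let costs := st.1
      let pe := st.2
      if PySem.Int.mod i 2 = 0 then
        (costs ++ [pe + PySem.List.pyGetD
            (((PySem.List.pyRange ((s.length:Int)-2) (-1) (-1)).foldl (fun Srev k =>
                Srev ++ [|PySem.List.pyGetD s (k+1) 0 - PySem.List.pyGetD s k 0| +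
                PySem.List.pyGetD Srev (-2) 0]) [0, 0]).reverse) (i+1) 0], pe)
      else
        let c := pe + (if i + 1 < (s.length : Int) then
            |PySem.List.pyGetD s (i+1) 0 - PySem.List.pyGetD s (i-1) 0| +
            PySem.List.pyGetD
            (((PySem.List.pyRange ((s.length:Int)-2) (-1) (-1)).foldl (fun Srev k =>
                Srev ++ [|PySem.List.pyGetD s (k+1) 0 - PySem.List.pyGetD s k 0| +
                PySem.List.pyGetD Srev (-2) 0]) [0, 0]).reverse) (i+2) 0 else 0)
        (costs ++ [c], pe + |PySem.List.pyGetD s i 0 - PySem.List.pyGetD s (i-1) 0|))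
      ([], 0)).1
    = (List.range s.length).map (fun i => pairSum (s.take i ++ s.drop (i+1))) := by
  by_cases hN : s.length = 0
  · have hnil : s = [] := List.eq_nil_of_length_eq_zero hN
    subst hnil
    rfl
  · have hN1 : 1 ≤ s.length := by omega
    rw [Srev_eq s hN1, S_eq s]
    rw [PySem.List.pyRange_one]
    simp only [sub_zero, Int.toNat_natCast, List.foldl_map, zero_add]
    rw [loopMain s s.length le_rfl]

theorem min_efficiency_eq_map (efficiency : List Int) :
    min_efficiency efficiency =
      (List.range efficiency.length).map (fun i =>
        pairSum ((PySem.List.sorted efficiency (fun x => x) false).take i ++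
                 (PySem.List.sorted efficiency (fun x => x) false).drop (i+1))) := by
  simp only [min_efficiency]
  rw [PySem.List.foldl_append_singleton_eq_map]
  rw [PySem.List.pyRange_one]
  simp only [List.nil_append, List.map_map, sub_zero, Int.toNat_natCast]
  refine List.map_congr_left (fun k hk => ?_)
  rw [List.mem_range] at hk
  set s := PySem.List.sorted efficiency (fun x => x) false with hs
  have hlen : s.length = efficiency.length := PySem.List.length_sorted ..
  simp only [Function.comp_apply, zero_add]
  rw [PySem.List.slice_to_natCast,
      show (k:Int) + 1 = ((k+1 : Nat) : Int) by push_cast; ring,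
      PySem.List.slice_from_natCast]
  have hplen : ((s.take k ++ s.drop (k+1)).length : Int) = (efficiency.length : Int) - 1 := by
    simp [List.length_take, List.length_drop, hlen]
    omega
  rw [show (efficiency.length : Int) - 2 = ((s.take k ++ s.drop (k+1)).length : Int) - 1 by omega]
  exact rangeSum_eq_pairSum _

theorem min_efficiency_alt_eq_map (efficiency : List Int) :
    min_efficiency_alt efficiency =
      (List.range efficiency.length).map (fun i =>
        pairSum ((PySem.List.sorted efficiency (fun x => x) false).take i ++
                 (PySem.List.sorted efficiency (fun x => x) false).drop (i+1))) := by
  have h := altBody_eq (PySem.List.sorted efficiency (fun x => x) false)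
  exact h.trans (by rw [PySem.List.length_sorted])

-- ===== VERDICT (by name: the statement is the Claim_ definition above) =====
theorem min_efficiency_spec : Claim_equal_min_efficiency := by
  intro efficiency _
  unfold Spec_min_efficiency
  rw [min_efficiency_eq_map, min_efficiency_alt_eq_map]
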